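-- pv_equiv track=rewrite | github.com/MinChoi0129/Algorithm_Problems | 2231 - 분해합.py | find_old_num
-- ===== SOURCE A (Python) =====
-- def find_old_num(new_num):
--     for i in range(1, new_num + 1):
--         string_i = str(i)
--         sum = i
--         for j in range(len(string_i)):
--             sum += int(string_i[j])
--         if new_num == sum:
--             return i
--     return 0
-- ===== SOURCE B (Python) =====
-- def find_old_num(new_num):
--     # digit sum of any candidate i <= new_num is at most 9 * number of digits,
--     # so only the window [new_num - 9*len(str(new_num)), new_num] can contain a match
--     start = max(1, new_num - 9 * len(str(new_num)))
--     for i in range(start, new_num + 1):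
--         n, s = i, 0
--         while n:
--             s += n % 10
--             n //= 10
--         if i + s == new_num:
--             return i
--     return 0
-- ===== Notes on version B (the rewrite author's own statement) =====
-- stated objective: faster
-- what changed: Instead of scanning every candidate from 1 to new_num with a string-based digit sum, B scans only the window [new_num - 9*len(str(new_num)), new_num] (any match must lie there) and computes the digit sum arithmetically with % and //.
import Mathlib
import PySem

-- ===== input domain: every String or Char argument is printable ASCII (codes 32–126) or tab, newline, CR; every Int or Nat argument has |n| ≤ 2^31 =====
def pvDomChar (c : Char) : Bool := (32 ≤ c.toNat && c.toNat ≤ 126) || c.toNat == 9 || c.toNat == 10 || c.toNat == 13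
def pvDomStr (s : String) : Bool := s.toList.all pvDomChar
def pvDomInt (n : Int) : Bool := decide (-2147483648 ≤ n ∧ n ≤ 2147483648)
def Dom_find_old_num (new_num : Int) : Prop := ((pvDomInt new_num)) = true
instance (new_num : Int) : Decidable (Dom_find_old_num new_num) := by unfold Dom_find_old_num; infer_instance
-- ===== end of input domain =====

-- B replaces A's scan of every candidate 1..new_num by a scan of only the window
-- [new_num - 9*len(str(new_num)), new_num] with an arithmetic digit sum (objective: faster).

-- ===== PORT A =====
-- the 'for i in range(1, new_num+1)' loop with early return; the inner
-- 'for j in range(len(string_i)): sum += int(string_i[j])' is the foldl.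
-- int() of a one-char slice of str(i) is PySem.Int.ofChars? [c]; its '.getD 0'
-- (and the pyGet? bind) are unreachable defaults: j is in range and str(i) has only digit chars.
def aLoop (new_num : Int) : List Int → Int
  | [] => 0
  | i :: rest =>
    let string_i := PySem.Int.toStr i
    let sum := (PySem.List.pyRange 0 (PySem.Str.len string_i) 1).foldl
        (fun s j => s + ((PySem.Str.pyGet? string_i j).bind (fun c => PySem.Int.ofChars? [c])).getD 0) i
    if new_num = sum then i else aLoop new_num rest

def find_old_num (new_num : Int) : Int :=
  aLoop new_num (PySem.List.pyRange 1 (new_num + 1) 1)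

-- ===== PORT B =====
-- 'while n: s += n % 10; n //= 10' of Source B
def digitSumAlt (n : Int) : Int :=
  if h : 0 < n then PySem.Int.mod n 10 + digitSumAlt (PySem.Int.floordiv n 10) else 0
termination_by n.toNat
decreasing_by
  rw [PySem.Int.floordiv_eq_ediv_of_pos (by norm_num : (0:Int) < 10)]
  have h4 : n = (n.toNat : Int) := (Int.toNat_of_nonneg (le_of_lt h)).symm
  have h5 : n / 10 = ((n.toNat / 10 : Nat) : Int) := by
    rw [h4]; exact (Int.natCast_div n.toNat 10).symm
  rw [h5, Int.toNat_natCast]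
  exact Nat.div_lt_self (by omega) (by norm_num)

-- 'for i in range(start, new_num+1)' loop of Source B with early return
def bLoop (new_num : Int) : List Int → Int
  | [] => 0
  | i :: rest => if i + digitSumAlt i = new_num then i else bLoop new_num rest

def find_old_num_alt (new_num : Int) : Int :=
  let start := max 1 (new_num - 9 * PySem.Str.len (PySem.Int.toStr new_num))
  bLoop new_num (PySem.List.pyRange start (new_num + 1) 1)

-- ===== PRECONDITION & SPEC =====
def Spec_find_old_num (new_num : Int) (out : Int) : Prop := out = find_old_num_alt new_num
instance (new_num : Int) (out : Int) : Decidable (Spec_find_old_num new_num out) := by unfold Spec_find_old_num; infer_instance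

-- ===== CLAIM (what is proved, stated in full; the proofs are below) =====
def Claim_equal_find_old_num : Prop := ∀ (new_num : Int), Dom_find_old_num new_num → Spec_find_old_num new_num (find_old_num new_num)

-- ===== LEMMAS AND PROOFS =====

-- value of a one-digit string under int(), as A computes it
def pvG (c : Char) : Int := (PySem.Int.ofChars? [c]).getD 0

-- mathematical decimal digit sum, the common reference of both ports
def pvDsN (n : Nat) : Int :=
  if h : n = 0 then 0 else ((n % 10 : Nat) : Int) + pvDsN (n / 10)
decreasing_by exact Nat.div_lt_self (Nat.pos_of_ne_zero h) (by norm_num)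

lemma pvDsN_zero : pvDsN 0 = 0 := by rw [pvDsN]; simp

lemma pvDsN_eq (n : Nat) (h : n ≠ 0) : pvDsN n = ((n % 10 : Nat) : Int) + pvDsN (n / 10) := by
  rw [pvDsN]; simp [h]

lemma pvG_digitChar (d : Nat) (hd : d < 10) : pvG (Nat.digitChar d) = (d : Int) := by
  interval_cases d <;> decide

lemma pvSumCore (fuel : Nat) : ∀ (n : Nat) (ds : List Char), n < fuel →
    ((Nat.toDigitsCore 10 fuel n ds).map pvG).sum
      = ((n % 10 : Nat) : Int) + pvDsN (n / 10) + ((ds.map pvG)).sum := by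
  induction fuel with
  | zero => intro n ds h; omega
  | succ fuel ih =>
    intro n ds h
    simp only [Nat.toDigitsCore]
    by_cases h0 : n / 10 = 0
    · have hn10 : n < 10 := by omega
      simp only [h0, if_true, List.map_cons, List.sum_cons, pvDsN_zero,
        pvG_digitChar (n % 10) (Nat.mod_lt n (by omega))]
      ring
    · simp only [h0, if_false]
      rw [ih (n / 10) _ (by have := Nat.div_lt_self (by omega : 0 < n) (by norm_num : 1 < 10); omega)]
      rw [pvDsN_eq (n / 10) h0]
      simp only [List.map_cons, List.sum_cons, pvG_digitChar (n % 10) (Nat.mod_lt n (by omega))]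
      ring

lemma pvSumToDigits (n : Nat) : ((Nat.toDigits 10 n).map pvG).sum = pvDsN n := by
  rw [Nat.toDigits, pvSumCore (n + 1) n [] (by omega)]
  by_cases h : n = 0
  · subst h; simp [pvDsN_zero]
  · rw [pvDsN_eq n h]; simp

lemma pvFoldList (cs : List Char) (a : Int) :
    (PySem.List.pyRange 0 (cs.length : Int) 1).foldl
        (fun s j => s + ((PySem.List.pyGet? cs j).bind (fun c => PySem.Int.ofChars? [c])).getD 0) a
      = a + (cs.map pvG).sum := by
  induction cs using List.reverseRecOn generalizing a with
  | nil => simp [PySem.List.pyRange_one_eq_nil]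
  | append_singleton ds c ih =>
    have hlen : (((ds ++ [c]).length : Nat) : Int) = ((ds.length : Nat) : Int) + 1 := by
      simp
    rw [hlen, PySem.List.pyRange_one_succ_right (by positivity), List.foldl_append]
    have hcong :
        (PySem.List.pyRange 0 ((ds.length : Nat) : Int) 1).foldl
          (fun s j => s + ((PySem.List.pyGet? (ds ++ [c]) j).bind (fun c => PySem.Int.ofChars? [c])).getD 0) a
        = (PySem.List.pyRange 0 ((ds.length : Nat) : Int) 1).foldl
          (fun s j => s + ((PySem.List.pyGet? ds j).bind (fun c => PySem.Int.ofChars? [c])).getD 0) a := by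
      apply PySem.List.foldl_congr_mem
      intro s j hj
      obtain ⟨hj0, hj1⟩ := PySem.List.mem_pyRange_one.mp hj
      have hk : j = ((j.toNat : Nat) : Int) := by omega
      have hkd : j.toNat < ds.length := by omega
      rw [hk, PySem.List.pyGet?_natCast, PySem.List.pyGet?_natCast,
        List.getElem?_append_left hkd]
    rw [hcong, ih]
    simp only [List.foldl_cons, List.foldl_nil]
    rw [PySem.List.pyGet?_natCast, List.getElem?_concat_length]
    simp only [Option.bind_some]
    have : (PySem.Int.ofChars? [c]).getD 0 = pvG c := rfl
    rw [this]
    simp [pvG]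
    ring

lemma pvDsB : ∀ (m : Nat) (i : Int), 0 ≤ i → i.toNat = m → digitSumAlt i = pvDsN m := by
  intro m
  induction m using Nat.strong_induction_on with
  | _ m ih =>
    intro i h0 hm
    rw [digitSumAlt]
    by_cases hp : 0 < i
    · rw [dif_pos hp]
      have h4 : i = (i.toNat : Int) := (Int.toNat_of_nonneg h0).symm
      have hfd : PySem.Int.floordiv i 10 = ((i.toNat / 10 : Nat) : Int) := by
        rw [PySem.Int.floordiv_eq_ediv_of_pos (by norm_num : (0:Int) < 10)]
        rw [h4]; exact (Int.natCast_div i.toNat 10).symm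
      have hmd : PySem.Int.mod i 10 = ((i.toNat % 10 : Nat) : Int) := by
        rw [PySem.Int.mod_eq_emod_of_pos (by norm_num : (0:Int) < 10)]
        rw [h4]; exact_mod_cast rfl
      rw [hfd, hmd, ih (i.toNat / 10) (by omega) _ (by positivity) (Int.toNat_natCast _)]
      rw [← hm, pvDsN_eq i.toNat (by omega)]
    · rw [dif_neg hp]
      have : m = 0 := by omega
      rw [this, pvDsN_zero]

lemma pvDsN_le (k : Nat) : ∀ (n : Nat), n < 10 ^ k → pvDsN n ≤ 9 * k := by
  induction k with
  | zero => intro n h; interval_cases n; simp [pvDsN_zero]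
  | succ k ih =>
    intro n h
    by_cases h0 : n = 0
    · subst h0; simp [pvDsN_zero]; positivity
    · rw [pvDsN_eq n h0]
      have hd : n / 10 < 10 ^ k := by
        rw [pow_succ] at h
        exact Nat.div_lt_of_lt_mul (by rwa [Nat.mul_comm] at h)
      have := ih (n / 10) hd
      have hm : n % 10 ≤ 9 := by omega
      push_cast
      push_cast at this
      omega

lemma pvLenLow (fuel : Nat) : ∀ (n : Nat) (ds : List Char), n < fuel →
    ∃ m, (Nat.toDigitsCore 10 fuel n ds).length = m + ds.length ∧ n < 10 ^ m := by
  induction fuel with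
  | zero => intro n ds h; omega
  | succ fuel ih =>
    intro n ds h
    simp only [Nat.toDigitsCore]
    by_cases h0 : n / 10 = 0
    · refine ⟨1, by simp [h0, Nat.add_comm], by omega⟩
    · simp only [h0, if_false]
      obtain ⟨m, hm, hlt⟩ := ih (n / 10) (Nat.digitChar (n % 10) :: ds)
        (by have := Nat.div_lt_self (by omega : 0 < n) (by norm_num : 1 < 10); omega)
      refine ⟨m + 1, by simpa [Nat.add_assoc, Nat.add_comm 1 ds.length] using hm, ?_⟩
      have : n < 10 * (n / 10) + 10 := by omega
      calc n < 10 * (n / 10) + 10 := this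
        _ ≤ 10 * 10 ^ m := by omega
        _ = 10 ^ (m + 1) := by ring

lemma pvLow (n : Nat) : n < 10 ^ (Nat.toDigits 10 n).length := by
  obtain ⟨m, hm, hlt⟩ := pvLenLow (n + 1) n [] (by omega)
  have hm' : (Nat.toDigitsCore 10 (n + 1) n []).length = m := by simpa using hm
  rw [Nat.toDigits, hm']
  exact hlt

-- A's inner sum for a candidate i ≥ 1 is i plus the digit sum of i
lemma pvFold (i : Int) (h : 1 ≤ i) :
    (PySem.List.pyRange 0 (PySem.Str.len (PySem.Int.toStr i)) 1).foldl
        (fun s j => s + ((PySem.Str.pyGet? (PySem.Int.toStr i) j).bind (fun c => PySem.Int.ofChars? [c])).getD 0) i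
      = i + pvDsN i.toNat := by
  have hneg : ¬ i < 0 := by omega
  simp only [PySem.Str.len_eq, PySem.Str.pyGet?_eq,
    PySem.Chars.pyGet?_eq_listPyGet?, PySem.Int.toList_toStr]
  rw [pvFoldList (PySem.Int.toChars i) i]
  simp only [PySem.Int.toChars, if_neg hneg]
  rw [pvSumToDigits]

lemma pvLoopAB (new_num : Int) : ∀ l : List Int, (∀ i ∈ l, 1 ≤ i) →
    aLoop new_num l = bLoop new_num l := by
  intro l
  induction l with
  | nil => intro _; rfl
  | cons i rest ih =>
    intro h
    have hi : 1 ≤ i := h i (by simp)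
    simp only [aLoop, bLoop]
    rw [pvFold i hi, pvDsB i.toNat i (by omega) rfl]
    have : (new_num = i + pvDsN i.toNat) ↔ (i + pvDsN i.toNat = new_num) := eq_comm
    rw [if_congr this rfl (ih (fun j hj => h j (by simp [hj])))]

lemma pvSkip (new_num : Int) : ∀ (l : List Int) (rest : List Int),
    (∀ i ∈ l, 1 ≤ i ∧ i + pvDsN i.toNat < new_num) →
    aLoop new_num (l ++ rest) = aLoop new_num rest := by
  intro l
  induction l with
  | nil => intro rest _; rfl
  | cons i tl ih =>
    intro rest h
    obtain ⟨hi, hlt⟩ := h i (by simp)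
    simp only [List.cons_append, aLoop]
    rw [pvFold i hi, if_neg (by omega)]
    exact ih rest (fun j hj => h j (by simp [hj]))

-- ===== VERDICT (by name: the statement is the Claim_ definition above) =====
theorem find_old_num_spec : Claim_equal_find_old_num := by
  intro new_num _dom
  show find_old_num new_num = find_old_num_alt new_num
  have hlenS : (0:Int) ≤ PySem.Str.len (PySem.Int.toStr new_num) := by
    simp [PySem.Str.len_eq]
  set lenS := PySem.Str.len (PySem.Int.toStr new_num) with hlen
  have hB : find_old_num_alt new_num
      = bLoop new_num (PySem.List.pyRange (max 1 (new_num - 9 * lenS)) (new_num + 1) 1) := rfl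
  have hA : find_old_num new_num = aLoop new_num (PySem.List.pyRange 1 (new_num + 1) 1) := rfl
  rw [hA, hB]
  by_cases hpos : 1 ≤ new_num
  · set start := max 1 (new_num - 9 * lenS) with hstart
    have h1 : (1:Int) ≤ start := le_max_left _ _
    have h2 : start ≤ new_num + 1 := max_le (by omega) (by nlinarith)
    rw [PySem.List.pyRange_one_append 1 start (new_num + 1) h1 h2]
    have hlenval : lenS = ((Nat.toDigits 10 new_num.toNat).length : Int) := by
      rw [hlen]
      simp [PySem.Str.len_eq, PySem.Int.toList_toStr,
        PySem.Int.toChars, show ¬ new_num < 0 by omega]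
    rw [pvSkip new_num _ _ ?skip]
    · exact pvLoopAB new_num _
        (fun i hi => by have := (PySem.List.mem_pyRange_one.mp hi).1; omega)
    case skip =>
      intro i hi
      obtain ⟨hi1, hi2⟩ := PySem.List.mem_pyRange_one.mp hi
      refine ⟨hi1, ?_⟩
      rcases max_choice 1 (new_num - 9 * lenS) with hc | hc
      · rw [← hstart] at hc; omega
      · rw [← hstart] at hc
        have hiN : i.toNat < 10 ^ (Nat.toDigits 10 new_num.toNat).length := by
          have hnn : new_num.toNat < 10 ^ (Nat.toDigits 10 new_num.toNat).length := pvLow _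
          have : i.toNat ≤ new_num.toNat := by omega
          omega
        have hds := pvDsN_le (Nat.toDigits 10 new_num.toNat).length i.toNat hiN
        rw [hlenval] at hc
        linarith
  · rw [PySem.List.pyRange_one_eq_nil (show new_num + 1 ≤ 1 by omega),
      PySem.List.pyRange_one_eq_nil (show new_num + 1 ≤ max 1 (new_num - 9 * lenS) from
        le_trans (by omega) (le_max_left _ _))]
    rfl
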